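-- pv_equiv track=rewrite | github.com/qhdgkdbs/codingTest | thisIsCodingTest_naDongbin/07 이진탐색/riceCake.py | rice_cake
-- ===== SOURCE A (Python) =====
-- def rice_cake(cnt, min_len, rice):
--     r_arr = list(map(int, rice.split()))
--
--     # 이진 탐색을 위한 시작점과 끝점 설정
--     start = 0
--     end = max(r_arr)
--
--     # 이진 탐색 반복 수행(반복적)
--     result = 0
--     while(start <= end):
--         total = 0
--         mid = (start + end) // 2
--         for x in r_arr:
--             # 잘랐을 때의 떡의 양 계산
--             if x > mid:
--                 total += x - mid
--         # 떡의 양이 부족한 경우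
--         if total < min_len:
--             # 떡을 더 짤라야하니깐, end 를 줄여버려
--             end = mid - 1
--         else:
--             # 떡의 길이가 충분하니깐, start(높이)를 키워버려
--             result = mid
--             start = mid + 1
--
--     return result
-- ===== SOURCE B (Python) =====
-- def rice_cake(cnt, min_len, rice):
--     # Sort descending and scan prefix sums: in the segment where exactly k cakes
--     # stand above height h, the cut total is P_k - k*h; solve for h by floor division.
--     s = sorted((int(t) for t in rice.split()), reverse=True)
--     m = s[0]
--     if m < 0:
--         return 0
--     if min_len <= 0:
--         return m
--     p = 0
--     for k in range(1, len(s) + 1):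
--         p += s[k - 1]
--         top = s[k - 1]
--         lo = max(s[k], 0) if k < len(s) else 0
--         h = (p - min_len) // k
--         if lo <= h < top:
--             return h
--     return 0
-- ===== Notes on version B (the rewrite author's own statement) =====
-- stated objective: alternative
-- what changed: Replaces A's binary search over candidate heights (recomputing the full cut total each probe) by one descending sort plus a single prefix-sum scan that solves P_k - k*h >= min_len for h by floor division inside the segment between consecutive sorted values.
import Mathlib
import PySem

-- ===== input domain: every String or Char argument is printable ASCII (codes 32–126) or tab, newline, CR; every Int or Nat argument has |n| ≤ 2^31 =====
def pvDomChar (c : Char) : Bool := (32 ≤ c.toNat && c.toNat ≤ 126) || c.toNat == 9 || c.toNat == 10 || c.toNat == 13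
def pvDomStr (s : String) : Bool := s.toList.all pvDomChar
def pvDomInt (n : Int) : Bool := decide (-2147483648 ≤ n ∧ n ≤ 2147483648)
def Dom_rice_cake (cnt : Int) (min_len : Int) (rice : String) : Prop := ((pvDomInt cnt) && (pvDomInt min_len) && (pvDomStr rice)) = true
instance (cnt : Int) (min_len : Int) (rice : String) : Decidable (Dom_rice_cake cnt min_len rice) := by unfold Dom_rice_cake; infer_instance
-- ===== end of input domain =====

-- B replaces A's binary search over the cut height by one sort-then-prefix-sum scan
-- that solves P_k - k*h >= min_len by floor division inside the right segment.

-- ===== PORT A =====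

-- the while-loop of A: state (start, end, result)
def riceLoopA (min_len : Int) (arr : List Int) (start e result : Int) : Int :=
  if _h : start ≤ e then
    let mid := PySem.Int.floordiv (start + e) 2
    let total := arr.foldl (fun t x => if x > mid then t + (x - mid) else t) 0
    if total < min_len then riceLoopA min_len arr start (mid - 1) result
    else riceLoopA min_len arr (mid + 1) e mid
  else result
termination_by (e + 1 - start).toNat
decreasing_by
  · have := PySem.Int.floordiv_two_mid_bounds (lo := start) (hi := e) _h
    omega
  · have := PySem.Int.floordiv_two_mid_bounds (lo := start) (hi := e) _h
    omega

def rice_cake (cnt : Int) (min_len : Int) (rice : String) : Int :=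
  match (PySem.Str.split₀ rice).mapM PySem.Int.ofStr? with
  | none => 0          -- int() raises ValueError: excluded by Pre_
  | some r_arr =>
    match PySem.List.max? r_arr (fun x => x) with
    | none => 0        -- max([]) raises ValueError: excluded by Pre_
    | some e0 => riceLoopA min_len r_arr 0 e0 0

-- ===== PORT B =====

-- the for-loop of B: walks the descending list, P = prefix sum so far, k = index (1-based)
def riceLoopB (min_len : Int) : Int → Int → List Int → Int
  | _, _, [] => 0
  | P, k, v :: rest =>
    let P' := P + v
    let lo : Int := match rest with | [] => 0 | w :: _ => max w 0
    let h := PySem.Int.floordiv (P' - min_len) k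
    if lo ≤ h ∧ h < v then h else riceLoopB min_len P' (k + 1) rest

def rice_cake_alt (cnt : Int) (min_len : Int) (rice : String) : Int :=
  match (PySem.Str.split₀ rice).mapM PySem.Int.ofStr? with
  | none => 0          -- int() raises ValueError: excluded by Pre_
  | some vals =>
    match PySem.List.sorted vals (fun x => x) true with
    | [] => 0          -- s[0] raises IndexError: excluded by Pre_
    | m :: rest =>
      if m < 0 then 0
      else if min_len ≤ 0 then m
      else riceLoopB min_len 0 1 (m :: rest)

-- ===== PRECONDITION & SPEC =====
-- A raises exactly when rice has no whitespace-separated tokens (max of empty) or a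
-- token is not an int literal (ValueError); B raises there too.
def Pre_rice_cake (cnt : Int) (min_len : Int) (rice : String) : Prop :=
  PySem.Str.split₀ rice ≠ [] ∧ ∀ t ∈ PySem.Str.split₀ rice, (PySem.Int.ofStr? t).isSome
instance (cnt : Int) (min_len : Int) (rice : String) : Decidable (Pre_rice_cake cnt min_len rice) := by
  unfold Pre_rice_cake; infer_instance

def pvWitness_rice_cake : Int × Int × String := (4, 6, "19 15 10 17")

def Spec_rice_cake (cnt : Int) (min_len : Int) (rice : String) (out : Int) : Prop := out = rice_cake_alt cnt min_len rice
instance (cnt : Int) (min_len : Int) (rice : String) (out : Int) : Decidable (Spec_rice_cake cnt min_len rice out) := by unfold Spec_rice_cake; infer_instance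

-- ===== CLAIM (what is proved, stated in full; the proofs are below) =====
def Claim_equal_rice_cake : Prop := ∀ (cnt : Int) (min_len : Int) (rice : String), Dom_rice_cake cnt min_len rice → Pre_rice_cake cnt min_len rice → Spec_rice_cake cnt min_len rice (rice_cake cnt min_len rice)

-- ===== LEMMAS AND PROOFS =====

-- total rice cut from list arr at height h
def cut (arr : List Int) (h : Int) : Int := (arr.map (fun x => if h < x then x - h else 0)).sum

-- the common functional specification: out is the greatest height in [0, M] whose cut
-- reaches min_len, or 0 if there is none
def RSpec (arr : List Int) (min_len M out : Int) : Prop :=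
  (out = 0 ∧ ∀ h, 0 ≤ h → h ≤ M → cut arr h < min_len) ∨
  (0 ≤ out ∧ out ≤ M ∧ min_len ≤ cut arr out ∧ ∀ h, out < h → h ≤ M → cut arr h < min_len)

theorem cut_foldl (arr : List Int) (mid : Int) :
    arr.foldl (fun t x => if x > mid then t + (x - mid) else t) 0 = cut arr mid := by
  have h := PySem.List.foldl_congr_mem (l := arr) (init := (0:Int))
    (f := fun t x => if x > mid then t + (x - mid) else t)
    (g := fun t x => t + (if mid < x then x - mid else 0))
    (by intro acc x _; dsimp only; split <;> simp_all)
  rw [h, PySem.List.foldl_add]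
  simp [cut]

theorem cut_mono (arr : List Int) {h h' : Int} (hle : h ≤ h') : cut arr h' ≤ cut arr h := by
  apply List.sum_le_sum
  intro x _
  dsimp only
  split <;> split <;> omega

theorem cut_zero_of_all_le (arr : List Int) {h : Int} (hall : ∀ x ∈ arr, x ≤ h) : cut arr h = 0 := by
  apply List.sum_eq_zero
  intro x hx
  simp only [List.mem_map] at hx
  obtain ⟨y, hy, rfl⟩ := hx
  have := hall y hy
  split <;> omega

theorem cut_perm {l₁ l₂ : List Int} (hp : l₁.Perm l₂) (h : Int) : cut l₁ h = cut l₂ h :=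
  (hp.map _).sum_eq

theorem cut_seg (pre suf : List Int) {h : Int}
    (h1 : ∀ x ∈ pre, h ≤ x) (h2 : ∀ x ∈ suf, x ≤ h) :
    cut (pre ++ suf) h = pre.sum - pre.length * h := by
  induction pre with
  | nil => simpa [cut] using cut_zero_of_all_le suf h2
  | cons x xs ih =>
    have hx := h1 x (by simp)
    have : cut (x :: (xs ++ suf)) h = (if h < x then x - h else 0) + cut (xs ++ suf) h := by
      simp [cut]
    rw [List.cons_append, this, ih (fun y hy => h1 y (by simp [hy]))]
    simp only [List.sum_cons, List.length_cons]
    push_cast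
    have hd : ((xs.length : Int) + 1) * h = (xs.length : Int) * h + h := by ring
    rw [hd]
    split <;> omega

theorem RSpec_unique {arr : List Int} {min_len M a b : Int}
    (ha : RSpec arr min_len M a) (hb : RSpec arr min_len M b) : a = b := by
  rcases ha with ⟨rfl, ha⟩ | ⟨ha0, haM, hac, ha⟩ <;>
    rcases hb with ⟨rfl, hb⟩ | ⟨hb0, hbM, hbc, hb⟩
  · rfl
  · exact absurd hbc (by have := ha b hb0 hbM; omega)
  · exact absurd hac (by have := hb a ha0 haM; omega)
  · rcases lt_trichotomy a b with h | h | h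
    · exact absurd hbc (by have := ha b h hbM; omega)
    · exact h
    · exact absurd hac (by have := hb a h haM; omega)

theorem loopA_spec (min_len M : Int) (arr : List Int) :
    ∀ n start e result, (e + 1 - start).toNat = n → 0 ≤ start → e ≤ M →
    (∀ h, e < h → h ≤ M → cut arr h < min_len) →
    ((result = 0 ∧ start = 0) ∨ (0 ≤ result ∧ result ≤ M ∧ min_len ≤ cut arr result ∧ start = result + 1)) →
    RSpec arr min_len M (riceLoopA min_len arr start e result) := by
  intro n
  induction n using Nat.strong_induction_on with
  | _ n ih =>
    intro start e result hn hs0 heM hctx hres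
    rw [riceLoopA]
    split
    · rename_i hse
      have hmid := PySem.Int.floordiv_two_mid_bounds (lo := start) (hi := e) hse
      set mid := PySem.Int.floordiv (start + e) 2 with hmiddef
      dsimp only
      rw [cut_foldl]
      split
      · rename_i htot
        refine ih ((mid - 1) + 1 - start).toNat (by omega) start (mid - 1) result rfl hs0 (by omega) ?_ hres
        intro h hh hhM
        rcases le_or_gt h e with h1 | h1
        · calc cut arr h ≤ cut arr mid := cut_mono arr (by omega)
            _ < min_len := htot
        · exact hctx h h1 hhM
      · rename_i htot
        refine ih (e + 1 - (mid + 1)).toNat (by omega) (mid + 1) e mid rfl (by omega) heM hctx ?_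
        right
        exact ⟨by omega, by omega, by omega, rfl⟩
    · rename_i hse
      rcases hres with ⟨rfl, rfl⟩ | ⟨h0, hM, hc, rfl⟩
      · left
        exact ⟨rfl, fun h hh hhM => hctx h (by omega) hhM⟩
      · right
        exact ⟨h0, hM, hc, fun h hh hhM => hctx h (by omega) hhM⟩

theorem mapM_isSome {toks : List String} (h : ∀ t ∈ toks, (PySem.Int.ofStr? t).isSome) :
    ∃ l, toks.mapM PySem.Int.ofStr? = some l ∧ l.length = toks.length := by
  induction toks with
  | nil => exact ⟨[], rfl, rfl⟩
  | cons t ts ih =>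
    obtain ⟨l, hl, hlen⟩ := ih (fun x hx => h x (by simp [hx]))
    obtain ⟨v, hv⟩ := Option.isSome_iff_exists.mp (h t (by simp))
    exact ⟨v :: l, by simp [List.mapM_cons, hv, hl], by simp [hlen]⟩

theorem loopB_spec (min_len M : Int) (arr s : List Int)
    (hperm : s.Perm arr) (hs : s.Pairwise (· ≥ ·)) (hM : ∀ y ∈ s, y ≤ M) (_hml : 0 < min_len) :
    ∀ rest done v, s = done ++ v :: rest →
    (∀ h, 0 ≤ h → v ≤ h → h ≤ M → cut arr h < min_len) →
    RSpec arr min_len M (riceLoopB min_len done.sum ((done.length : Int) + 1) (v :: rest)) := by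
  intro rest
  induction rest with
  | nil =>
    intro done v hseq hinv
    set k : Int := (done.length : Int) + 1 with hkdef
    have hk : (0 : Int) < k := by positivity
    set P' : Int := done.sum + v with hP'def
    set h : Int := PySem.Int.floordiv (P' - min_len) k with hhdef
    have hdv : ∀ x ∈ done, v ≤ x := by
      have := (List.pairwise_append.mp (hseq ▸ hs)).2.2
      intro x hx; exact this x hx v (by simp)
    have hvM : v ≤ M := hM v (by rw [hseq]; simp)
    have seg : ∀ h', h' ≤ v → cut arr h' = P' - k * h' := by
      intro h' hh
      rw [← cut_perm hperm h', hseq, ← List.singleton_append, ← List.append_assoc,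
        cut_seg (done ++ [v]) [] (by
          intro x hx
          rcases List.mem_append.mp hx with hx | hx
          · exact le_trans hh (hdv x hx)
          · simp at hx; omega) (by simp)]
      simp [hP'def, hkdef]
      try push_cast
      try ring
    have hfloor_le : ∀ q : Int, q ≤ h ↔ q * k ≤ P' - min_len := by
      intro q; rw [hhdef]; exact PySem.Int.le_floordiv_iff_mul_le hk
    have hfloor_lt : ∀ q : Int, h < q ↔ P' - min_len < q * k := by
      intro q; rw [hhdef]; exact PySem.Int.floordiv_lt_iff_lt_mul hk
    have hnotbig : 0 < v → ¬ (v ≤ h) := by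
      intro hv0 hvh
      have h1 : v * k ≤ P' - min_len := (hfloor_le v).mp hvh
      have h2 : cut arr v < min_len := hinv v (by omega) le_rfl hvM
      rw [seg v le_rfl] at h2
      nlinarith [mul_comm v k]
    show RSpec arr min_len M (if (0:Int) ≤ h ∧ h < v then h else riceLoopB min_len P' (k+1) [])
    split
    · rename_i hif
      obtain ⟨hlo, hhv⟩ := hif
      right
      refine ⟨hlo, by omega, ?_, ?_⟩
      · rw [seg h (by omega)]
        have := (hfloor_le h).mp le_rfl
        nlinarith [mul_comm h k]
      · intro h' hh' hh'M
        rcases le_or_gt v h' with h1 | h1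
        · exact hinv h' (by omega) h1 hh'M
        · rw [seg h' (by omega)]
          have := (hfloor_lt h').mp hh'
          nlinarith [mul_comm h' k]
    · rename_i hif
      left
      refine ⟨rfl, ?_⟩
      intro h' hh' hh'M
      rcases le_or_gt v h' with h1 | h1
      · exact hinv h' hh' h1 hh'M
      · have hv0 : 0 < v := by omega
        have hh : h < 0 := by
          rcases not_and_or.mp hif with hx | hx
          · omega
          · exact absurd (by omega) (hnotbig hv0)
        rw [seg h' (by omega)]
        have := (hfloor_lt h').mp (by omega)
        nlinarith [mul_comm h' k]
  | cons w rest' ih =>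
    intro done v hseq hinv
    set k : Int := (done.length : Int) + 1 with hkdef
    have hk : (0 : Int) < k := by positivity
    set P' : Int := done.sum + v with hP'def
    set h : Int := PySem.Int.floordiv (P' - min_len) k with hhdef
    have hpa := List.pairwise_append.mp (hseq ▸ hs)
    have hdv : ∀ x ∈ done, v ≤ x := fun x hx => hpa.2.2 x hx v (by simp)
    have htail : ∀ x ∈ w :: rest', x ≤ v := by
      have := List.pairwise_cons.mp hpa.2.1
      exact this.1
    have htailw : ∀ x ∈ w :: rest', x ≤ w := by
      have h2 := (List.pairwise_cons.mp (List.pairwise_cons.mp hpa.2.1).2).1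
      intro x hx
      rcases List.mem_cons.mp hx with rfl | hx
      · exact le_refl x
      · exact h2 x hx
    have hvM : v ≤ M := hM v (by rw [hseq]; simp)
    have seg : ∀ h', h' ≤ v → w ≤ h' → cut arr h' = P' - k * h' := by
      intro h' hh hw
      rw [← cut_perm hperm h', hseq, ← List.singleton_append, ← List.append_assoc,
        cut_seg (done ++ [v]) (w :: rest') (by
          intro x hx
          rcases List.mem_append.mp hx with hx | hx
          · exact le_trans hh (hdv x hx)
          · simp at hx; omega) (fun x hx => le_trans (htailw x hx) hw)]
      simp [hP'def, hkdef]
      try push_cast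
      try ring
    have hfloor_le : ∀ q : Int, q ≤ h ↔ q * k ≤ P' - min_len := by
      intro q; rw [hhdef]; exact PySem.Int.le_floordiv_iff_mul_le hk
    have hfloor_lt : ∀ q : Int, h < q ↔ P' - min_len < q * k := by
      intro q; rw [hhdef]; exact PySem.Int.floordiv_lt_iff_lt_mul hk
    have hnotbig : 0 < v → ¬ (v ≤ h) := by
      intro hv0 hvh
      have h1 : v * k ≤ P' - min_len := (hfloor_le v).mp hvh
      have h2 : cut arr v < min_len := hinv v (by omega) le_rfl hvM
      rw [seg v le_rfl (htail w (by simp))] at h2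
      nlinarith [mul_comm v k]
    show RSpec arr min_len M (if max w 0 ≤ h ∧ h < v then h else riceLoopB min_len P' (k+1) (w :: rest'))
    split
    · rename_i hif
      obtain ⟨hlo, hhv⟩ := hif
      have hwh : w ≤ h := le_trans (le_max_left w 0) hlo
      have hh0 : (0:Int) ≤ h := le_trans (le_max_right w 0) hlo
      right
      refine ⟨hh0, by omega, ?_, ?_⟩
      · rw [seg h (by omega) hwh]
        have := (hfloor_le h).mp le_rfl
        nlinarith [mul_comm h k]
      · intro h' hh' hh'M
        rcases le_or_gt v h' with h1 | h1
        · exact hinv h' (by omega) h1 hh'M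
        · rw [seg h' (by omega) (by omega)]
          have := (hfloor_lt h').mp hh'
          nlinarith [mul_comm h' k]
    · rename_i hif
      have hgoal := ih (done ++ [v]) w (by rw [hseq]; simp) ?_
      · have he1 : (done ++ [v]).sum = P' := by simp [hP'def]
        have he2 : ((done ++ [v]).length : Int) + 1 = k + 1 := by simp [hkdef]
        rwa [he1, he2] at hgoal
      · intro h' hh' hwh' hh'M
        rcases le_or_gt v h' with h1 | h1
        · exact hinv h' hh' h1 hh'M
        · have hv0 : 0 < v := by omega
          have hh : h < max w 0 := by
            rcases not_and_or.mp hif with hx | hx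
            · omega
            · exact absurd (by omega) (hnotbig hv0)
          rw [seg h' (by omega) hwh']
          have := (hfloor_lt h').mp (by omega)
          nlinarith [mul_comm h' k]


theorem cut_zero_high (arr : List Int) {M h : Int} (hM : ∀ x ∈ arr, x ≤ M) (hh : M ≤ h) :
    cut arr h = 0 :=
  cut_zero_of_all_le arr (fun x hx => le_trans (hM x hx) hh)

-- ===== VERDICT (by name: the statement is the Claim_ definition above) =====
theorem rice_cake_spec : Claim_equal_rice_cake := by
  intro cnt min_len rice _hdom hpre
  unfold Spec_rice_cake
  obtain ⟨hne, hall⟩ := hpre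
  obtain ⟨arr, hmapM, hlen⟩ := mapM_isSome hall
  have harrne : arr ≠ [] := by
    intro hnil
    apply hne
    rw [hnil] at hlen
    exact List.length_eq_zero_iff.mp hlen.symm
  obtain ⟨a0, t0, harr⟩ := List.exists_cons_of_ne_nil harrne
  have hmax : PySem.List.max? arr (fun x => x) = some (t0.foldl max a0) := by
    rw [harr]; exact PySem.List.max?_id_cons a0 t0
  set M : Int := t0.foldl max a0 with hMdef
  have hMmem : M ∈ arr := by
    rcases PySem.List.foldl_max_mem t0 a0 with h | h
    · rw [harr, ← hMdef] at *; rw [h]; exact List.mem_cons_self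
    · rw [harr]; exact List.mem_cons_of_mem a0 h
  have hMmax : ∀ y ∈ arr, y ≤ M := by
    intro y hy
    rw [harr] at hy
    rcases List.mem_cons.mp hy with rfl | hy
    · exact (PySem.List.le_foldl_max t0 y).1
    · exact (PySem.List.le_foldl_max t0 a0).2 y hy
  have hperm : (PySem.List.sorted arr (fun x => x) true).Perm arr :=
    PySem.List.sorted_perm arr (fun x => x) true
  obtain ⟨m, rest, hcons⟩ : ∃ m rest, PySem.List.sorted arr (fun x => x) true = m :: rest := by
    cases hS : PySem.List.sorted arr (fun x => x) true with
    | nil =>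
      exfalso
      apply harrne
      have := hperm.length_eq
      rw [hS] at this
      exact List.length_eq_zero_iff.mp this.symm
    | cons m rest => exact ⟨m, rest, rfl⟩
  rw [hcons] at hperm
  have hmM : m = M := by
    have h1 : m ≤ M := hMmax m (hperm.mem_iff.mp List.mem_cons_self)
    have h2 : M ≤ m := PySem.List.key_head_sorted_rev_ge arr (fun x => x) hcons M hMmem
    omega
  have hspair : (m :: rest).Pairwise (· ≥ ·) := by
    have := PySem.List.sorted_pairwise_rev (xs := arr) (key := fun x => x)
    rwa [hcons] at this
  have hsM : ∀ y ∈ m :: rest, y ≤ M := fun y hy => hMmax y (hperm.mem_iff.mp hy)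
  -- A's result satisfies RSpec
  have hA : RSpec arr min_len M (rice_cake cnt min_len rice) := by
    unfold rice_cake
    simp only [hmapM, hmax]
    exact loopA_spec min_len M arr (M + 1 - 0).toNat 0 M 0 rfl le_rfl le_rfl
      (fun h h1 h2 => absurd h1 (by omega)) (Or.inl ⟨rfl, rfl⟩)
  -- B's result satisfies RSpec
  have hB : RSpec arr min_len M (rice_cake_alt cnt min_len rice) := by
    unfold rice_cake_alt
    simp only [hmapM, hcons]
    by_cases hm0 : m < 0
    · simp only [if_pos hm0]
      left
      refine ⟨rfl, fun h h1 h2 => absurd h1 (by omega)⟩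
    · rw [if_neg hm0]
      by_cases hml : min_len ≤ 0
      · rw [if_pos hml]
        right
        refine ⟨by omega, by omega, ?_, fun h h1 h2 => absurd h1 (by omega)⟩
        rw [cut_zero_high arr hMmax (by omega)]
        omega
      · rw [if_neg hml]
        have := loopB_spec min_len M arr (m :: rest) hperm hspair hsM (by omega) rest [] m rfl
          (fun h h1 h2 h3 => by
            rw [cut_zero_high arr hMmax (by omega)]
            omega)
        simpa using this
  exact RSpec_unique hA hB
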